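-- pv_equiv track=rewrite | github.com/EOPF-Explorer/data-model | src/eopf_geozarr/s2_optimization/s2_multiscale.py | _calculate_aligned_chunk_size
-- ===== SOURCE A (Python) =====
-- def _calculate_aligned_chunk_size(
--     dimension_size: int, target_chunk: int
-- ) -> int:
--     """
--     Calculate aligned chunk size following geozarr.py logic.
--
--     This ensures good chunk alignment without complex calculations.
--     """
--     if target_chunk >= dimension_size:
--         return dimension_size
--
--     # Find the largest divisor of dimension_size that's close to target_chunk
--     best_chunk = target_chunk
--     for chunk_candidate in range(target_chunk, max(target_chunk // 2, 1), -1):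
--         if dimension_size % chunk_candidate == 0:
--             best_chunk = chunk_candidate
--             break
--
--     return best_chunk
-- ===== SOURCE B (Python) =====
-- def _calculate_aligned_chunk_size(
--     dimension_size: int, target_chunk: int
-- ) -> int:
--     """Divisor-enumeration re-implementation: collect divisors of
--     dimension_size by trial division up to sqrt, keep the largest one in
--     the window (target_chunk // 2, target_chunk]; fall back to
--     target_chunk when no divisor lands in the window."""
--     if target_chunk >= dimension_size:
--         return dimension_size
--     lo = max(target_chunk // 2, 1)
--     best = 0
--     i = 1
--     while i * i <= dimension_size:
--         if dimension_size % i == 0: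
--             for d in (i, dimension_size // i):
--                 if lo < d <= target_chunk and best < d:
--                     best = d
--         i += 1
--     return best if best else target_chunk
-- ===== Notes on version B (the rewrite author's own statement) =====
-- stated objective: alternative
-- what changed: Replaces A's downward scan over every candidate in (target_chunk//2, target_chunk] with trial-division divisor enumeration of dimension_size up to sqrt(dimension_size), keeping the largest divisor that falls in the window; O(sqrt(dimension_size)) instead of O(target_chunk) modulo tests.
import Mathlib
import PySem

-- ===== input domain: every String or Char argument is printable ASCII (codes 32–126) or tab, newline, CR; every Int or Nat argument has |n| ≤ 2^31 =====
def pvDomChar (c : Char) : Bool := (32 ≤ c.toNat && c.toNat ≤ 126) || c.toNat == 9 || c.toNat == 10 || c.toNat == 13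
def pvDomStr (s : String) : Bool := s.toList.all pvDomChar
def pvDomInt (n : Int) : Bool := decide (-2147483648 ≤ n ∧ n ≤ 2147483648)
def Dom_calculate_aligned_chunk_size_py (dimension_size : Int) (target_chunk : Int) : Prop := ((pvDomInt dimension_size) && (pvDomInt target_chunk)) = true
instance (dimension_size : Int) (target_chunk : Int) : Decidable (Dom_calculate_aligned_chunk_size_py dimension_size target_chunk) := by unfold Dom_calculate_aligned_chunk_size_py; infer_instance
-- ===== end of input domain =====

-- B replaces A's downward scan over the candidate window with trial-division divisor
-- enumeration of dimension_size up to its square root (alternative algorithm, same result).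


-- ===== PORT A =====
-- A's loop: scan the candidates downward, return the first divisor (the 'break'), else target_chunk.
def pvAFind (ds tc : Int) : List Int → Int
  | [] => tc
  | c :: cs => if PySem.Int.mod ds c = 0 then c else pvAFind ds tc cs

def calculate_aligned_chunk_size_py (dimension_size : Int) (target_chunk : Int) : Int :=
  if target_chunk ≥ dimension_size then dimension_size
  else
    pvAFind dimension_size target_chunk
      (PySem.List.pyRange target_chunk (max (PySem.Int.floordiv target_chunk 2) 1) (-1))

-- ===== PORT B =====
-- Source B's inner 'for d in (i, dimension_size // i)' body: keep d if it is in the window and bigger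
def pvBUpd (lo tc best d : Int) : Int :=
  if lo < d ∧ d ≤ tc ∧ best < d then d else best

-- Source B's 'while i * i <= dimension_size' loop; the Python variable i only takes values 1,2,…, so it is a Nat here
def pvBScan (ds lo tc : Int) (i : Nat) (best : Int) : Int :=
  if h : (i : Int) * i ≤ ds then
    pvBScan ds lo tc (i + 1)
      (if PySem.Int.mod ds i = 0 then
        pvBUpd lo tc (pvBUpd lo tc best i) (PySem.Int.floordiv ds i)
      else best)
  else best
termination_by ds.toNat + 1 - i
decreasing_by
  have h1 : (i : Int) ≤ ds ∨ i = 0 := by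
    rcases Nat.eq_zero_or_pos i with h0 | h0
    · right; exact h0
    · left
      have hi1 : (1 : Int) ≤ (i : Int) := by exact_mod_cast h0
      nlinarith [hi1]
  omega

def calculate_aligned_chunk_size_py_alt (dimension_size : Int) (target_chunk : Int) : Int :=
  if target_chunk ≥ dimension_size then dimension_size
  else
    let lo := max (PySem.Int.floordiv target_chunk 2) 1
    let best := pvBScan dimension_size lo target_chunk 1 0
    if best = 0 then target_chunk else best

-- ===== PRECONDITION & SPEC =====
def Spec_calculate_aligned_chunk_size_py (dimension_size : Int) (target_chunk : Int) (out : Int) : Prop := out = calculate_aligned_chunk_size_py_alt dimension_size target_chunk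
instance (dimension_size : Int) (target_chunk : Int) (out : Int) : Decidable (Spec_calculate_aligned_chunk_size_py dimension_size target_chunk out) := by unfold Spec_calculate_aligned_chunk_size_py; infer_instance

-- ===== CLAIM (what is proved, stated in full; the proofs are below) =====
def Claim_equal_calculate_aligned_chunk_size_py : Prop := ∀ (dimension_size : Int) (target_chunk : Int), Dom_calculate_aligned_chunk_size_py dimension_size target_chunk → Spec_calculate_aligned_chunk_size_py dimension_size target_chunk (calculate_aligned_chunk_size_py dimension_size target_chunk)

-- ===== LEMMAS AND PROOFS =====

/-- `d` is a divisor of `ds` lying in the window `(lo, tc]`. -/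
def pvW (ds lo tc d : Int) : Prop := lo < d ∧ d ≤ tc ∧ ds % d = 0

/-- Common characterisation of both results: the largest window divisor, or `tc` when there is none. -/
def pvIsAns (ds lo tc r : Int) : Prop :=
  (pvW ds lo tc r ∧ ∀ d, pvW ds lo tc d → d ≤ r) ∨ (r = tc ∧ ∀ d, ¬ pvW ds lo tc d)

lemma pvIsAns_unique {ds lo tc r r' : Int}
    (h1 : pvIsAns ds lo tc r) (h2 : pvIsAns ds lo tc r') : r = r' := by
  rcases h1 with ⟨hw, hmax⟩ | ⟨he, hno⟩ <;> rcases h2 with ⟨hw', hmax'⟩ | ⟨he', hno'⟩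
  · exact le_antisymm (hmax' _ hw) (hmax _ hw')
  · exact absurd hw (hno' _)
  · exact absurd hw' (hno _)
  · rw [he, he']

/-- A's downward first-hit scan yields the LARGEST window divisor (or `tc`). -/
lemma pvAFind_isAns (ds lo tc : Int) (hlo : 1 ≤ lo) :
    ∀ (n : Nat) (k : Int), k = lo + n → k ≤ tc →
      (∀ d, pvW ds lo tc d → d ≤ k) →
      pvIsAns ds lo tc (pvAFind ds tc (PySem.List.pyRange k lo (-1))) := by
  intro n
  induction n with
  | zero =>
    intro k hk _ hbound
    rw [PySem.List.pyRange_neg_one_eq_nil (by omega)]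
    refine Or.inr ⟨rfl, fun d hd => ?_⟩
    have h1 := hbound d hd
    have h2 := hd.1
    omega
  | succ n ih =>
    intro k hk hktc hbound
    have hlk : lo < k := by omega
    rw [PySem.List.pyRange_neg_one_cons hlk]
    by_cases hm : PySem.Int.mod ds k = 0
    · have hmod : ds % k = 0 := by
        rw [← PySem.Int.mod_eq_emod_of_pos (show (0:Int) < k by omega)]; exact hm
      simp only [pvAFind, if_pos hm]
      exact Or.inl ⟨⟨hlk, hktc, hmod⟩, hbound⟩
    · simp only [pvAFind, if_neg hm]
      apply ih (k - 1) (by omega) (by omega)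
      intro d hd
      have h1 := hbound d hd
      have h2 : d ≠ k := by
        intro he
        apply hm
        rw [PySem.Int.mod_eq_emod_of_pos (show (0:Int) < k by omega)]
        rw [← he]
        exact hd.2.2
      omega

/-- `d` has already been produced by a loop iteration `< i` of B's scan
    (either as the small factor or as the cofactor). -/
def pvVis (ds : Int) (i : Nat) (d : Int) : Prop :=
  (d < (i : Int) ∧ d * d ≤ ds) ∨ (ds / d < (i : Int) ∧ (ds / d) * (ds / d) ≤ ds)

lemma pvBUpd_le (lo tc b d : Int) : b ≤ pvBUpd lo tc b d := by
  unfold pvBUpd; split_ifs with h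
  · exact le_of_lt h.2.2
  · exact le_refl b

lemma pvBUpd_ge (lo tc b d : Int) (h1 : lo < d) (h2 : d ≤ tc) : d ≤ pvBUpd lo tc b d := by
  unfold pvBUpd; split_ifs with h
  · exact le_refl d
  · have : ¬ b < d := fun hb => h ⟨h1, h2, hb⟩
    omega

lemma pvBUpd_cases (lo tc b d : Int) :
    pvBUpd lo tc b d = b ∨ (pvBUpd lo tc b d = d ∧ lo < d ∧ d ≤ tc) := by
  unfold pvBUpd; split_ifs with h
  · exact Or.inr ⟨rfl, h.1, h.2.1⟩
  · exact Or.inl rfl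

/-- Once `i * i > ds`, every divisor `d < ds` of `ds` has been visited: `min(d, ds/d)² ≤ ds < i²`. -/
lemma pvVisited_final (ds d : Int) (i : Nat) (hd : 2 ≤ d) (hdvd : ds % d = 0)
    (hds : d < ds) (hgt : ds < (i : Int) * i) : pvVis ds i d := by
  have hd0 : (0:Int) < d := by omega
  have hdvd' : d ∣ ds := Int.dvd_of_emod_eq_zero hdvd
  have hq : d * (ds / d) = ds := Int.mul_ediv_cancel' hdvd'
  have hq1 : 1 ≤ ds / d := by rw [Int.le_ediv_iff_mul_le hd0]; omega
  have hin : (0:Int) ≤ i := by positivity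
  by_cases hsq : d * d ≤ ds
  · left
    refine ⟨?_, hsq⟩
    by_contra hcon
    have hi : (i:Int) ≤ d := by omega
    nlinarith
  · right
    have hqd : ds / d < d := by nlinarith
    refine ⟨?_, by nlinarith⟩
    by_contra hcon
    have hi : (i:Int) ≤ ds / d := by omega
    nlinarith

/-- Loop invariant of B's scan: `best` is the largest VISITED window divisor (0 if none);
    at exit it is the largest window divisor overall. -/
theorem pvBScan_post (ds lo tc : Int) (hlo : 1 ≤ lo) (hdtc : tc < ds)
    (i : Nat) (best : Int) (hi : 1 ≤ i)
    (hb : best = 0 ∨ pvW ds lo tc best)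
    (hcov : ∀ d, pvW ds lo tc d → pvVis ds i d → d ≤ best) :
    (pvBScan ds lo tc i best = 0 ∨ pvW ds lo tc (pvBScan ds lo tc i best)) ∧
      ∀ d, pvW ds lo tc d → d ≤ pvBScan ds lo tc i best := by
  rw [pvBScan]
  by_cases h : (i : Int) * i ≤ ds
  · rw [dif_pos h]
    -- loop body: pass the invariant to the next iteration
    have hi0 : (0:Int) < (i:Int) := by exact_mod_cast hi
    set best' := (if PySem.Int.mod ds i = 0 then
        pvBUpd lo tc (pvBUpd lo tc best i) (PySem.Int.floordiv ds i)
      else best) with hbest'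
    have hmono : best ≤ best' := by
      rw [hbest']; split_ifs with hm
      · exact le_trans (pvBUpd_le lo tc best i) (pvBUpd_le lo tc _ _)
      · exact le_refl best
    have hb' : best' = 0 ∨ pvW ds lo tc best' := by
      rw [hbest']; split_ifs with hm
      · have hmod : ds % (i:Int) = 0 := by
          rw [← PySem.Int.mod_eq_emod_of_pos hi0]; exact hm
        have hidvd : (i:Int) ∣ ds := Int.dvd_of_emod_eq_zero hmod
        have hb1 : pvBUpd lo tc best i = 0 ∨ pvW ds lo tc (pvBUpd lo tc best i) := by
          rcases pvBUpd_cases lo tc best i with hc | ⟨hc, hw1, hw2⟩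
          · rw [hc]; exact hb
          · rw [hc]; exact Or.inr ⟨hw1, hw2, hmod⟩
        rcases pvBUpd_cases lo tc (pvBUpd lo tc best i) (PySem.Int.floordiv ds i) with hc | ⟨hc, hw1, hw2⟩
        · rw [hc]; exact hb1
        · rw [hc]
          refine Or.inr ⟨hw1, hw2, ?_⟩
          rw [PySem.Int.floordiv_eq_ediv_of_pos hi0] at *
          have : ds / (i:Int) ∣ ds := ⟨i, (Int.ediv_mul_cancel hidvd).symm⟩
          exact Int.emod_eq_zero_of_dvd this
      · exact hb
    refine pvBScan_post ds lo tc hlo hdtc (i + 1) best' (by omega) hb' ?_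
    intro d hd hvis
    by_cases hvi : pvVis ds i d
    · exact le_trans (hcov d hd hvi) hmono
    · have hd2 : 2 ≤ d := by have := hd.1; omega
      have hdpos : (0:Int) < d := by omega
      have hdvdd : d ∣ ds := Int.dvd_of_emod_eq_zero hd.2.2
      rcases not_or.mp hvi with ⟨hA, hB⟩
      rcases hvis with ⟨hlt, hsq⟩ | ⟨hlt, hsq⟩
      · -- d is newly visited as the small factor: d = i
        have hdi : d = (i:Int) := by
          have : ¬ d < (i:Int) := fun hh => hA ⟨hh, hsq⟩
          push_cast at hlt
          omega
        have hm : PySem.Int.mod ds i = 0 := by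
          rw [PySem.Int.mod_eq_emod_of_pos hi0, ← hdi]; exact hd.2.2
        rw [hbest', if_pos hm]
        calc d ≤ pvBUpd lo tc best i := hdi ▸ pvBUpd_ge lo tc best d hd.1 hd.2.1
          _ ≤ _ := pvBUpd_le lo tc _ _
      · -- d is newly visited as the cofactor: ds / d = i, so d = ds // i
        have hqi : ds / d = (i:Int) := by
          have : ¬ ds / d < (i:Int) := fun hh => hB ⟨hh, hsq⟩
          push_cast at hlt
          omega
        have hds_eq : ds = (i:Int) * d := by
          have h5 := Int.ediv_mul_cancel hdvdd
          rw [hqi] at h5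
          exact h5.symm
        have hm : PySem.Int.mod ds i = 0 := by
          rw [PySem.Int.mod_eq_emod_of_pos hi0]
          exact Int.emod_eq_zero_of_dvd ⟨d, hds_eq⟩
        have hfd : PySem.Int.floordiv ds i = d := by
          rw [PySem.Int.floordiv_eq_ediv_of_pos hi0, hds_eq]
          exact Int.mul_ediv_cancel_left d (by omega)
        rw [hbest', if_pos hm, ← hfd]
        exact pvBUpd_ge lo tc _ _ (hfd ▸ hd.1) (hfd ▸ hd.2.1)
  · rw [dif_neg h]
    -- loop finished: every window divisor has been visited
    refine ⟨hb, fun d hd => hcov d hd ?_⟩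
    have hd2 : 2 ≤ d := by have := hd.1; omega
    exact pvVisited_final ds d i hd2 hd.2.2 (by have := hd.2.1; omega) (by omega)
termination_by ds.toNat + 1 - i
decreasing_by
  have h1 : (i : Int) ≤ ds := by nlinarith
  omega

-- ===== VERDICT (by name: the statement is the Claim_ definition above) =====
theorem calculate_aligned_chunk_size_py_spec : Claim_equal_calculate_aligned_chunk_size_py := by
  intro ds tc _
  unfold Spec_calculate_aligned_chunk_size_py
  unfold calculate_aligned_chunk_size_py calculate_aligned_chunk_size_py_alt
  by_cases hge : tc ≥ ds
  · rw [if_pos hge, if_pos hge]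
  · rw [if_neg hge, if_neg hge]
    have hds : tc < ds := by omega
    set lo := max (PySem.Int.floordiv tc 2) 1 with hlo_def
    have hlo : 1 ≤ lo := le_max_right _ _
    have hcov1 : ∀ d, pvW ds lo tc d → pvVis ds 1 d → d ≤ 0 := by
      intro d hd hv
      exfalso
      have hd2 : 2 ≤ d := by have := hd.1; omega
      have hdle : d ≤ ds := by have := hd.2.1; omega
      have hq1 : 1 ≤ ds / d := by rw [Int.le_ediv_iff_mul_le (by omega)]; omega
      rcases hv with ⟨h1, _⟩ | ⟨h1, _⟩
      · push_cast at h1; omega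
      · push_cast at h1; omega
    have hpost := pvBScan_post ds lo tc hlo hds 1 0 (le_refl 1) (Or.inl rfl) hcov1
    have hBans : pvIsAns ds lo tc
        (if pvBScan ds lo tc 1 0 = 0 then tc else pvBScan ds lo tc 1 0) := by
      split_ifs with h0
      · refine Or.inr ⟨rfl, fun d hd => ?_⟩
        have h1 := hpost.2 d hd
        have h2 := hd.1
        rw [h0] at h1
        omega
      · rcases hpost.1 with h | h
        · exact absurd h h0
        · exact Or.inl ⟨h, hpost.2⟩
    have hAans : pvIsAns ds lo tc (pvAFind ds tc (PySem.List.pyRange tc lo (-1))) := by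
      by_cases hlt : lo ≤ tc
      · exact pvAFind_isAns ds lo tc hlo (tc - lo).toNat tc (by omega) (le_refl tc)
          (fun d hd => hd.2.1)
      · rw [PySem.List.pyRange_neg_one_eq_nil (by omega)]
        refine Or.inr ⟨rfl, fun d hd => ?_⟩
        have h1 := hd.1
        have h2 := hd.2.1
        omega
    exact pvIsAns_unique hAans hBans
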